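-- pv_equiv track=rewrite | github.com/zxp19821005/aur-update-checker-python | src/modules/checkers/upstream_curl_checker.py | _filter_version_candidates
-- ===== SOURCE A (Python) =====
-- def _filter_version_candidates(version_candidates, aur_version=None):
--     """过滤和验证版本候选列表"""
--     if not version_candidates:
--         return []
--
--     # 移除可能是部分版本号的候选项
--     filtered_candidates = []
--     for version in version_candidates:
--         # 检查是否是其他版本的子串
--         is_substring = False
--         for other_version in version_candidates:
--             # 如果当前版本是其他版本的子串，且不是完全相同
--             if version != other_version and version in other_version:
--                 # 检查是否是数字边界的子串（例如 "6.37" 是 "2.6.37" 的子串，但不是边界对齐的）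
--                 version_parts = version.split('.')
--                 other_parts = other_version.split('.')
--
--                 # 检查是否是尾部对齐的子串
--                 if len(version_parts) <= len(other_parts) and \
--                    version_parts == other_parts[-len(version_parts):]:
--                     is_substring = True
--                     break
--
--                 # 检查是否是头部对齐的子串
--                 if len(version_parts) <= len(other_parts) and \
--                    version_parts == other_parts[:len(version_parts)]:
--                     is_substring = True
--                     break
--
--                 # 检查是否是中间对齐的子串（如 "6.37" 在 "2.6.37.0" 中）
--                 for i in range(len(other_parts) - len(version_parts) + 1):
--                     if version_parts == other_parts[i:i+len(version_parts)]:
--                         is_substring = True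
--                         break
--
--         # 额外验证版本号格式是否符合AUR版本格式
--         if aur_version:
--             aur_parts = aur_version.split('.')
--             version_parts = version.split('.')
--
--             # 如果AUR版本和候选版本的段数差异过大，则过滤掉
--             if abs(len(aur_parts) - len(version_parts)) > 1:
--                 continue
--
--         if not is_substring:
--             filtered_candidates.append(version)
--
--     return filtered_candidates
-- ===== SOURCE B (Python) =====
-- def _filter_version_candidates(version_candidates, aur_version=None):
--     """Index every contiguous run of dot-parts once, then test each candidate
--     by a single dictionary lookup instead of rescanning all other candidates."""
--     # producers: tuple of parts -> set of candidate strings containing that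
--     # contiguous run of parts
--     producers = {}
--     for cand in version_candidates:
--         parts = cand.split('.')
--         n = len(parts)
--         for i in range(n):
--             for j in range(i + 1, n + 1):
--                 t = tuple(parts[i:j])
--                 s = producers.get(t, set())
--                 s.add(cand)
--                 producers[t] = s
--
--     aur_len = len(aur_version.split('.')) if aur_version else None
--
--     result = []
--     for version in version_candidates:
--         parts = version.split('.')
--         if aur_len is not None and abs(aur_len - len(parts)) > 1:
--             continue
--         owners = producers.get(tuple(parts), set())
--         if not any(o != version and version in o for o in owners):
--             result.append(version)
--     return result
-- ===== Notes on version B (the rewrite author's own statement) =====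
-- stated objective: faster
-- what changed: A rescans every other candidate (with substring and three alignment checks) for each candidate; B builds, in one pass, a dictionary from every contiguous run of dot-separated parts to the set of candidates containing it, so each candidate is then tested by a single dictionary lookup.
import Mathlib
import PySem

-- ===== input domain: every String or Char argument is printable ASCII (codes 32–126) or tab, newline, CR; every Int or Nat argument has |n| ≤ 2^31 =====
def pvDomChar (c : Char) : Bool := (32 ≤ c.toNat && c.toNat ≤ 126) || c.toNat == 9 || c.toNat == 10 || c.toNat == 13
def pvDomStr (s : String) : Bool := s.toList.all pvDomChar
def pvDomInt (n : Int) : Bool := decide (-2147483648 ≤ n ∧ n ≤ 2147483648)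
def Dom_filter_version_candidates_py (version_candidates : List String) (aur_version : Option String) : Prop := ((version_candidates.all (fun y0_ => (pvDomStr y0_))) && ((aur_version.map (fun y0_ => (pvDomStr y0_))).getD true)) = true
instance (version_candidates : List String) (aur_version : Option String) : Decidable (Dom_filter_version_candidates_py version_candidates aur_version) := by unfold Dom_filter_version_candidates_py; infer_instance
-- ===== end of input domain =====

-- B replaces A's rescan of all other candidates per candidate by a dictionary built once,
-- mapping every contiguous run of dot-separated parts to the set of candidates containing it
-- (objective: faster — one index pass plus one lookup per candidate).

-- ===== PORT A =====

-- s.split('.')  (separator non-empty, so split? is always `some`)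
def pySplitDot (s : String) : List String := (PySem.Str.split? s ".").getD []

-- truthiness of the optional aur_version ('if aur_version:')
def pvTruthy : Option String → Bool
  | none => false
  | some a => a != ""

-- 'for i in range(len(other_parts) - len(version_parts) + 1): if version_parts == other_parts[i:i+len(version_parts)]: …; break'
def pvA_midLoop (vp op : List String) : List Int → Bool
  | [] => false
  | i :: rest =>
    if vp = PySem.List.slice op (some i) (some (i + (vp.length : Int))) then true
    else pvA_midLoop vp op rest

-- inner 'for other_version in version_candidates' loop, carrying is_substring (break returns true)
def pvA_inner (version : String) : List String → Bool → Bool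
  | [], acc => acc
  | other :: rest, acc =>
    if (version != other) && PySem.Str.isIn version other then
      let vp := pySplitDot version
      let op := pySplitDot other
      if vp.length ≤ op.length ∧ vp = PySem.List.slice op (some (-(vp.length : Int))) none then true
      else if vp.length ≤ op.length ∧ vp = PySem.List.slice op none (some (vp.length : Int)) then true
      else
        pvA_inner version rest
          (acc || pvA_midLoop vp op (PySem.List.pyRange 0 ((op.length : Int) - (vp.length : Int) + 1)))
    else pvA_inner version rest acc

-- outer 'for version in version_candidates' loop with filtered_candidates accumulator
def pvA_loop (vc : List String) (aur : Option String) : List String → List String → List String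
  | acc, [] => acc
  | acc, version :: rest =>
    let is_sub := pvA_inner version vc false
    if pvTruthy aur then
      if (((pySplitDot (aur.getD "")).length : Int) - ((pySplitDot version).length : Int)).natAbs > 1 then
        pvA_loop vc aur acc rest
      else if is_sub = false then pvA_loop vc aur (acc ++ [version]) rest
      else pvA_loop vc aur acc rest
    else if is_sub = false then pvA_loop vc aur (acc ++ [version]) rest
    else pvA_loop vc aur acc rest

def filter_version_candidates_py (version_candidates : List String) (aur_version : Option String) : List String :=
  if version_candidates = [] then []
  else pvA_loop version_candidates aur_version [] version_candidates

-- ===== PORT B =====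

-- s = producers.get(t, set()); s.add(cand); producers[t] = s
def pvB_addKey (d : PySem.Dict (List String) (PySem.Set String)) (t : List String) (cand : String) :
    PySem.Dict (List String) (PySem.Set String) :=
  d.insert t ((d.getD t PySem.Set.empty).add cand)

-- the index-building pass of B
def pvB_index (vc : List String) : PySem.Dict (List String) (PySem.Set String) :=
  vc.foldl (fun d cand =>
    let parts := pySplitDot cand
    (PySem.List.pyRange 0 (parts.length : Int)).foldl (fun d i =>
      (PySem.List.pyRange (i + 1) ((parts.length : Int) + 1)).foldl (fun d j =>
        pvB_addKey d (PySem.List.slice parts (some i) (some j)) cand) d) d)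
    PySem.Dict.empty

def filter_version_candidates_py_alt (version_candidates : List String) (aur_version : Option String) : List String :=
  let producers := pvB_index version_candidates
  let aurLen? : Option Int :=
    if pvTruthy aur_version then some ((pySplitDot (aur_version.getD "")).length : Int) else none
  version_candidates.foldl (fun result version =>
    let parts := pySplitDot version
    let skip : Bool :=
      match aurLen? with
      | some al => (al - (parts.length : Int)).natAbs > 1
      | none => false
    if skip then result
    else if (producers.getD parts PySem.Set.empty).any
              (fun o => (o != version) && PySem.Str.isIn version o) = false then
      result ++ [version]
    else result) []

-- ===== PRECONDITION & SPEC =====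
def Spec_filter_version_candidates_py (version_candidates : List String) (aur_version : Option String) (out : List String) : Prop := out = filter_version_candidates_py_alt version_candidates aur_version
instance (version_candidates : List String) (aur_version : Option String) (out : List String) : Decidable (Spec_filter_version_candidates_py version_candidates aur_version out) := by unfold Spec_filter_version_candidates_py; infer_instance

-- ===== CLAIM (what is proved, stated in full; the proofs are below) =====
def Claim_equal_filter_version_candidates_py : Prop := ∀ (version_candidates : List String) (aur_version : Option String), Dom_filter_version_candidates_py version_candidates aur_version → Spec_filter_version_candidates_py version_candidates aur_version (filter_version_candidates_py version_candidates aur_version)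

-- ===== LEMMAS AND PROOFS =====

-- version_parts is a contiguous run of other's parts (at offset i)
def pvExI (v o : String) : Prop :=
  ∃ i : Nat, i + (pySplitDot v).length ≤ (pySplitDot o).length ∧
    pySplitDot v = ((pySplitDot o).drop i).take (pySplitDot v).length

-- the per-other condition both programs test
def pvCond (v o : String) : Prop :=
  v ≠ o ∧ PySem.Str.isIn v o = true ∧ pvExI v o

lemma pv_go_ne_nil (sep : List Char) (fuel : Nat) :
    ∀ (l cur : List Char) (acc : List (List Char)), PySem.Chars.splitOn.go sep fuel l cur acc ≠ [] := by
  induction fuel with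
  | zero => intro l cur acc h; simp [PySem.Chars.splitOn.go] at h
  | succ n ih =>
    intro l cur acc h
    cases l with
    | nil => simp [PySem.Chars.splitOn.go] at h
    | cons c rest =>
      by_cases hp : sep.isPrefixOf (c :: rest) = true
      · simp only [PySem.Chars.splitOn.go, hp, if_true] at h
        exact ih _ _ _ h
      · simp only [PySem.Chars.splitOn.go, hp, if_false, Bool.false_eq_true] at h
        exact ih _ _ _ h

lemma pySplitDot_ne_nil (s : String) : pySplitDot s ≠ [] := by
  intro h
  have hsep : ("." : String).toList = ['.'] := rfl
  have h2 : PySem.Chars.splitOn s.toList ['.'] = [] := by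
    simpa [pySplitDot, PySem.Str.split?, PySem.Chars.split?, hsep] using h
  exact pv_go_ne_nil ['.'] (s.toList.length + 1) s.toList [] []
    (by simpa [PySem.Chars.splitOn] using h2)

lemma pySplitDot_length_pos (s : String) : 0 < (pySplitDot s).length :=
  List.length_pos_iff.mpr (pySplitDot_ne_nil s)

lemma pv_midLoop_iff (vp op : List String) :
    ∀ L : List Int, pvA_midLoop vp op L = true ↔
      ∃ i ∈ L, vp = PySem.List.slice op (some i) (some (i + (vp.length : Int))) := by
  intro L
  induction L with
  | nil => simp [pvA_midLoop]
  | cons i rest ih =>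
    simp only [pvA_midLoop]
    split_ifs with h
    · constructor
      · intro _; exact ⟨i, List.mem_cons_self, h⟩
      · intro _; rfl
    · rw [ih]
      constructor
      · rintro ⟨i', hi', hv⟩; exact ⟨i', List.mem_cons_of_mem _ hi', hv⟩
      · rintro ⟨i', hi', hv⟩
        rcases List.mem_cons.mp hi' with rfl | h'
        · exact absurd hv h
        · exact ⟨i', h', hv⟩

lemma pv_mid_range_iff (v o : String) :
    pvA_midLoop (pySplitDot v) (pySplitDot o)
      (PySem.List.pyRange 0 (((pySplitDot o).length : Int) - ((pySplitDot v).length : Int) + 1)) = true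
    ↔ pvExI v o := by
  rw [pv_midLoop_iff]
  constructor
  · rintro ⟨i, hi, hvp⟩
    rw [PySem.List.mem_pyRange_one] at hi
    obtain ⟨hi0, hilt⟩ := hi
    obtain ⟨m, rfl⟩ := Int.eq_ofNat_of_zero_le hi0
    rw [PySem.List.slice_natCast_add] at hvp
    exact ⟨m, by omega, hvp⟩
  · rintro ⟨m, hm, hvp⟩
    refine ⟨(m : Int), ?_, ?_⟩
    · rw [PySem.List.mem_pyRange_one]
      constructor
      · omega
      · have := pySplitDot_length_pos v
        omega
    · rw [PySem.List.slice_natCast_add]; exact hvp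

lemma pv_tail_imp (v o : String)
    (hle : (pySplitDot v).length ≤ (pySplitDot o).length)
    (hvp : pySplitDot v = PySem.List.slice (pySplitDot o) (some (-((pySplitDot v).length : Int))) none) :
    pvExI v o := by
  have hk := pySplitDot_length_pos v
  rw [PySem.List.slice_from_neg_natCast _ _ hk] at hvp
  refine ⟨(pySplitDot o).length - (pySplitDot v).length, by omega, ?_⟩
  have htake : ((pySplitDot o).drop ((pySplitDot o).length - (pySplitDot v).length)).take
      (pySplitDot v).length
      = (pySplitDot o).drop ((pySplitDot o).length - (pySplitDot v).length) :=
    List.take_of_length_le (by rw [List.length_drop]; omega)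
  rw [htake]; exact hvp

lemma pv_head_imp (v o : String)
    (hle : (pySplitDot v).length ≤ (pySplitDot o).length)
    (hvp : pySplitDot v = PySem.List.slice (pySplitDot o) none (some ((pySplitDot v).length : Int))) :
    pvExI v o := by
  rw [PySem.List.slice_to_natCast] at hvp
  exact ⟨0, by omega, by simpa using hvp⟩

lemma pv_inner_iff (v : String) :
    ∀ (others : List String) (acc : Bool),
      pvA_inner v others acc = true ↔ (acc = true ∨ ∃ o ∈ others, pvCond v o) := by
  intro others
  induction others with
  | nil => intro acc; simp [pvA_inner]
  | cons o rest ih =>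
    intro acc
    simp only [pvA_inner]
    by_cases hg : ((v != o) && PySem.Str.isIn v o) = true
    · rw [if_pos hg]
      rw [Bool.and_eq_true, bne_iff_ne] at hg
      obtain ⟨hne, hin⟩ := hg
      split_ifs with h1 h2
      · constructor
        · intro _
          exact Or.inr ⟨o, List.mem_cons_self, hne, hin, pv_tail_imp v o h1.1 h1.2⟩
        · intro _; rfl
      · constructor
        · intro _
          exact Or.inr ⟨o, List.mem_cons_self, hne, hin, pv_head_imp v o h2.1 h2.2⟩
        · intro _; rfl
      · rw [ih]
        rw [Bool.or_eq_true, pv_mid_range_iff]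
        constructor
        · rintro (⟨h | h⟩ | ⟨o', ho', hc⟩)
          · exact Or.inl h
          · exact Or.inr ⟨o, List.mem_cons_self, hne, hin, h⟩
          · exact Or.inr ⟨o', List.mem_cons_of_mem _ ho', hc⟩
        · rintro (h | ⟨o', ho', hc⟩)
          · exact Or.inl (Or.inl h)
          · rcases List.mem_cons.mp ho' with rfl | ho''
            · exact Or.inl (Or.inr hc.2.2)
            · exact Or.inr ⟨o', ho'', hc⟩
    · rw [if_neg hg]
      rw [ih]
      constructor
      · rintro (h | ⟨o', ho', hc⟩)
        · exact Or.inl h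
        · exact Or.inr ⟨o', List.mem_cons_of_mem _ ho', hc⟩
      · rintro (h | ⟨o', ho', hc⟩)
        · exact Or.inl h
        · rcases List.mem_cons.mp ho' with rfl | ho''
          · exfalso
            apply hg
            rw [Bool.and_eq_true, bne_iff_ne]
            exact ⟨hc.1, hc.2.1⟩
          · exact Or.inr ⟨o', ho'', hc⟩

-- B-side: membership in the set stored under key t after the j-fold
lemma pv_mem_getD_addKey_foldl (c : String) (key : Int → List String) :
    ∀ (L : List Int) (d : PySem.Dict (List String) (PySem.Set String)) (t : List String) (o : String),
      o ∈ (L.foldl (fun d j => pvB_addKey d (key j) c) d).getD t PySem.Set.empty ↔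
        (o ∈ d.getD t PySem.Set.empty ∨ (o = c ∧ ∃ j ∈ L, t = key j)) := by
  intro L
  induction L with
  | nil => simp
  | cons j L ih =>
    intro d t o
    simp only [List.foldl_cons]
    rw [ih]
    unfold pvB_addKey
    by_cases ht : t = key j
    · subst ht
      rw [PySem.Dict.getD_insert_self, PySem.Set.mem_add]
      constructor
      · rintro ((h | rfl) | ⟨rfl, _⟩)
        · exact Or.inl h
        · exact Or.inr ⟨rfl, j, List.mem_cons_self, rfl⟩
        · exact Or.inr ⟨rfl, j, List.mem_cons_self, rfl⟩
      · rintro (h | ⟨rfl, _⟩)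
        · exact Or.inl (Or.inl h)
        · exact Or.inl (Or.inr rfl)
    · rw [PySem.Dict.getD_insert, if_neg ht]
      constructor
      · rintro (h | ⟨rfl, j', hj', ht'⟩)
        · exact Or.inl h
        · exact Or.inr ⟨rfl, j', List.mem_cons_of_mem _ hj', ht'⟩
      · rintro (h | ⟨rfl, j', hj', ht'⟩)
        · exact Or.inl h
        · rcases List.mem_cons.mp hj' with rfl | hj''
          · exact absurd ht' ht
          · exact Or.inr ⟨rfl, j', hj'', ht'⟩

-- B-side: membership after indexing one candidate
lemma pv_mem_getD_buildCand (c : String) (parts : List String) :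
    ∀ (I : List Int) (d : PySem.Dict (List String) (PySem.Set String)) (t : List String) (o : String),
      o ∈ (I.foldl (fun d i =>
            (PySem.List.pyRange (i + 1) ((parts.length : Int) + 1)).foldl (fun d j =>
              pvB_addKey d (PySem.List.slice parts (some i) (some j)) c) d) d).getD t PySem.Set.empty ↔
        (o ∈ d.getD t PySem.Set.empty ∨
          (o = c ∧ ∃ i ∈ I, ∃ j ∈ PySem.List.pyRange (i + 1) ((parts.length : Int) + 1),
            t = PySem.List.slice parts (some i) (some j))) := by
  intro I
  induction I with
  | nil => simp
  | cons i I ih =>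
    intro d t o
    simp only [List.foldl_cons]
    rw [ih, pv_mem_getD_addKey_foldl]
    constructor
    · rintro ((h | ⟨rfl, j, hj, ht⟩) | ⟨rfl, i', hi', j', hj', ht'⟩)
      · exact Or.inl h
      · exact Or.inr ⟨rfl, i, List.mem_cons_self, j, hj, ht⟩
      · exact Or.inr ⟨rfl, i', List.mem_cons_of_mem _ hi', j', hj', ht'⟩
    · rintro (h | ⟨rfl, i', hi', j', hj', ht'⟩)
      · exact Or.inl (Or.inl h)
      · rcases List.mem_cons.mp hi' with rfl | hi''
        · exact Or.inl (Or.inr ⟨rfl, j', hj', ht'⟩)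
        · exact Or.inr ⟨rfl, i', hi'', j', hj', ht'⟩

-- key t holds candidate c's contiguous part-runs
def pvRn (t : List String) (c : String) : Prop :=
  ∃ i ∈ PySem.List.pyRange 0 (((pySplitDot c).length : Int)),
    ∃ j ∈ PySem.List.pyRange (i + 1) (((pySplitDot c).length : Int) + 1),
      t = PySem.List.slice (pySplitDot c) (some i) (some j)

lemma pv_mem_getD_index :
    ∀ (vc : List String) (d : PySem.Dict (List String) (PySem.Set String)) (t : List String) (o : String),
      o ∈ (vc.foldl (fun d cand =>
            let parts := pySplitDot cand
            (PySem.List.pyRange 0 (parts.length : Int)).foldl (fun d i =>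
              (PySem.List.pyRange (i + 1) ((parts.length : Int) + 1)).foldl (fun d j =>
                pvB_addKey d (PySem.List.slice parts (some i) (some j)) cand) d) d) d).getD t PySem.Set.empty ↔
        (o ∈ d.getD t PySem.Set.empty ∨ (o ∈ vc ∧ pvRn t o)) := by
  intro vc
  induction vc with
  | nil => simp
  | cons c vc ih =>
    intro d t o
    simp only [List.foldl_cons]
    rw [ih, pv_mem_getD_buildCand]
    unfold pvRn
    constructor
    · rintro ((h | ⟨rfl, hr⟩) | ⟨ho, hr⟩)
      · exact Or.inl h
      · exact Or.inr ⟨List.mem_cons_self, hr⟩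
      · exact Or.inr ⟨List.mem_cons_of_mem _ ho, hr⟩
    · rintro (h | ⟨ho, hr⟩)
      · exact Or.inl (Or.inl h)
      · rcases List.mem_cons.mp ho with rfl | ho'
        · exact Or.inl (Or.inr ⟨rfl, hr⟩)
        · exact Or.inr ⟨ho', hr⟩

lemma pv_Rn_iff_ExI (v c : String) : pvRn (pySplitDot v) c ↔ pvExI v c := by
  unfold pvRn pvExI
  constructor
  · rintro ⟨i, hi, j, hj, ht⟩
    rw [PySem.List.mem_pyRange_one] at hi hj
    obtain ⟨m, rfl⟩ := Int.eq_ofNat_of_zero_le hi.1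
    have hj0 : (0 : Int) ≤ j := by omega
    obtain ⟨m', rfl⟩ := Int.eq_ofNat_of_zero_le hj0
    rw [PySem.List.slice_natCast] at ht
    have hmm : m < m' := by exact_mod_cast (by omega : ((m : Int)) < (m' : Int))
    have hm'le : m' ≤ (pySplitDot c).length := by omega
    have hlen : (pySplitDot v).length = m' - m := by
      rw [ht, List.length_take, List.length_drop]; omega
    refine ⟨m, by omega, ?_⟩
    rw [hlen, ht]
  · rintro ⟨m, hm, hvp⟩
    have hk := pySplitDot_length_pos v
    refine ⟨(m : Int), ?_, ((m : Int) + ((pySplitDot v).length : Int)), ?_, ?_⟩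
    · rw [PySem.List.mem_pyRange_one]; omega
    · rw [PySem.List.mem_pyRange_one]; omega
    · rw [PySem.List.slice_natCast_add]; exact hvp

-- both programs' per-version substring test agree
lemma pv_sub_eq (vc : List String) (v : String) :
    pvA_inner v vc false =
      ((pvB_index vc).getD (pySplitDot v) PySem.Set.empty).any
        (fun o => (o != v) && PySem.Str.isIn v o) := by
  have hA := pv_inner_iff v vc false
  have hB : (((pvB_index vc).getD (pySplitDot v) PySem.Set.empty).any
      (fun o => (o != v) && PySem.Str.isIn v o) = true) ↔ ∃ o ∈ vc, pvCond v o := by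
    rw [List.any_eq_true]
    unfold pvB_index
    constructor
    · rintro ⟨o, ho, hp⟩
      rw [pv_mem_getD_index] at ho
      rcases ho with h | ⟨hovc, hr⟩
      · simp at h
      · rw [Bool.and_eq_true, bne_iff_ne] at hp
        exact ⟨o, hovc, Ne.symm hp.1, hp.2, (pv_Rn_iff_ExI v o).mp hr⟩
    · rintro ⟨o, ho, hne, hin, hex⟩
      refine ⟨o, ?_, ?_⟩
      · rw [pv_mem_getD_index]
        exact Or.inr ⟨ho, (pv_Rn_iff_ExI v o).mpr hex⟩
      · rw [Bool.and_eq_true, bne_iff_ne]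
        exact ⟨Ne.symm hne, hin⟩
  rw [Bool.eq_iff_iff]
  rw [hA, hB]
  simp

-- the common per-version step of the output loop
def pvStep (vc : List String) (aur : Option String) (result : List String) (version : String) :
    List String :=
  if pvTruthy aur &&
      decide ((((pySplitDot (aur.getD "")).length : Int) - ((pySplitDot version).length : Int)).natAbs > 1) then
    result
  else if ((pvB_index vc).getD (pySplitDot version) PySem.Set.empty).any
            (fun o => (o != version) && PySem.Str.isIn version o) = false then
    result ++ [version]
  else result

lemma pv_loops_eq_aux (vc : List String) (aur : Option String) :
    ∀ (l acc : List String), pvA_loop vc aur acc l = l.foldl (pvStep vc aur) acc := by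
  intro l
  induction l with
  | nil => intro acc; simp [pvA_loop]
  | cons version rest ih =>
    intro acc
    simp only [pvA_loop, List.foldl_cons]
    have hstep : pvStep vc aur acc version =
        (if pvTruthy aur then
          (if (((pySplitDot (aur.getD "")).length : Int) - ((pySplitDot version).length : Int)).natAbs > 1 then acc
           else if pvA_inner version vc false = false then acc ++ [version] else acc)
         else if pvA_inner version vc false = false then acc ++ [version] else acc) := by
      unfold pvStep
      rw [← pv_sub_eq vc version]
      by_cases ht : pvTruthy aur = true
      · by_cases hskip : (((pySplitDot (aur.getD "")).length : Int) - ((pySplitDot version).length : Int)).natAbs > 1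
        · simp [ht, hskip]
        · simp [ht, hskip]
      · have ht' : pvTruthy aur = false := by
          cases h : pvTruthy aur
          · rfl
          · exact absurd h ht
        simp [ht']
    rw [hstep]
    split_ifs <;> first | exact ih acc | exact ih (acc ++ [version])

lemma pv_alt_eq (vc : List String) (aur : Option String) :
    filter_version_candidates_py_alt vc aur = vc.foldl (pvStep vc aur) [] := by
  simp only [filter_version_candidates_py_alt]
  apply List.foldl_ext
  intro acc version _
  by_cases ht : pvTruthy aur = true
  · by_cases hskip : (((pySplitDot (aur.getD "")).length : Int) - ((pySplitDot version).length : Int)).natAbs > 1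
    · simp [ht, hskip, pvStep]
    · simp [ht, hskip, pvStep]
  · have ht' : pvTruthy aur = false := by
      cases h : pvTruthy aur
      · rfl
      · exact absurd h ht
    simp [ht', pvStep]

-- ===== VERDICT (by name: the statement is the Claim_ definition above) =====
theorem filter_version_candidates_py_spec : Claim_equal_filter_version_candidates_py := by
  intro vc aur _
  unfold Spec_filter_version_candidates_py
  rw [pv_alt_eq]
  unfold filter_version_candidates_py
  by_cases hvc : vc = []
  · subst hvc; simp
  · rw [if_neg hvc]
    exact pv_loops_eq_aux vc aur vc []
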